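-- pv_equiv track=rewrite | github.com/igor-ma/leggo-content | segmentador/divide_em_arquivos.py | separa_em_blocos
-- ===== SOURCE A (Python) =====
-- def separa_em_blocos(pares_palavra_tag):
-- 	'''
-- 	Separa o documento em diferentes blocos/segmentos.
-- 	Retorna uma lista de documentos/blocos.
-- 	'''
--
-- 	documentos = []
-- 	documento = []
-- 	for i in range(len(pares_palavra_tag)):
-- 		documento.append(pares_palavra_tag[i])
-- 		if('B-' in pares_palavra_tag[i][1] and len(documento) > 1): #se encontrar um Begin (depois de uma sequência de Outs ou NÃO logo após um End, len(documento) > 1)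
-- 			aux = documento.pop()
-- 			documentos.append(documento)
-- 			documento = []
-- 			documento.append(aux)
-- 		else:
-- 			if('E-' in pares_palavra_tag[i][1]): #se encontrar um End
-- 				documentos.append(documento)
-- 				documento = []
--
-- 	return documentos
-- ===== SOURCE B (Python) =====
-- def separa_em_blocos(pares_palavra_tag):
--     '''
--     Separa o documento em diferentes blocos/segmentos.
--     Retorna uma lista de documentos/blocos.
--     '''
--     cuts = []
--     cur = 0
--     for i, (_, tag) in enumerate(pares_palavra_tag):
--         if 'B-' in tag and cur < i:
--             cuts.append((cur, i))
--             cur = i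
--         elif 'E-' in tag:
--             cuts.append((cur, i + 1))
--             cur = i + 1
--     return [pares_palavra_tag[s:e] for s, e in cuts]
-- ===== Notes on version B (the rewrite author's own statement) =====
-- stated objective: alternative
-- what changed: Instead of mutating/accumulating the current block list element by element, B makes one pass that records only (start, end) index cut pairs and then materialises the blocks by slicing the input, preserving the B-before-E precedence, the non-empty-block condition and the dropped trailing open block.
import Mathlib
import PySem

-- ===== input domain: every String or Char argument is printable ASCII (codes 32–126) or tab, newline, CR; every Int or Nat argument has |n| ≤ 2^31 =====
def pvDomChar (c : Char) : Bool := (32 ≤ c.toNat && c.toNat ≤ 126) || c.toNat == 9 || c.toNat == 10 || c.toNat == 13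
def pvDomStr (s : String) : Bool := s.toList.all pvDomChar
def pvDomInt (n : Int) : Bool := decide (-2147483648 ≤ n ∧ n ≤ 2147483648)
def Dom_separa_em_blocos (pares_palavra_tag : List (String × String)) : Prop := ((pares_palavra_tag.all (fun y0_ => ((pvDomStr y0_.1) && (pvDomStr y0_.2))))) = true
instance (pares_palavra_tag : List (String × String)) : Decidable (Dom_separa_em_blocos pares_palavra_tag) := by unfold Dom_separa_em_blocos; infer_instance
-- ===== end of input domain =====

-- B records (start, end) cut indices in one pass and slices the input, instead of A's
-- element-by-element accumulation of the current block; same behaviour, same cost (objective: alternative).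

-- ===== PORT A =====
-- loop body of A's for-loop (state = (documentos, documento), input = pares_palavra_tag[i])
def sepA_body (st : List (List (String × String)) × List (String × String))
    (p : String × String) : List (List (String × String)) × List (String × String) :=
  let documento := st.2 ++ [p]
  if PySem.Str.isIn "B-" p.2 && decide (1 < documento.length) then
    -- aux = documento.pop(); documentos.append(documento); documento = [aux]
    (st.1 ++ [documento.dropLast], [documento.getLastD ("", "")])
  else if PySem.Str.isIn "E-" p.2 then
    (st.1 ++ [documento], [])
  else
    (st.1, documento)

def separa_em_blocos (pares_palavra_tag : List (String × String)) : List (List (String × String)) :=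
  ((PySem.List.pyRange 0 (pares_palavra_tag.length : Int) 1).foldl
      (fun st i => sepA_body st (PySem.List.pyGetD pares_palavra_tag i ("", "")))
      ([], [])).1

-- ===== PORT B =====
-- loop body of B's for-loop (state = (cuts, cur), input = (i, (word, tag)))
def sepB_body (st : List (Int × Int) × Int)
    (ip : Int × String × String) : List (Int × Int) × Int :=
  if PySem.Str.isIn "B-" ip.2.2 && decide (st.2 < ip.1) then
    (st.1 ++ [(st.2, ip.1)], ip.1)
  else if PySem.Str.isIn "E-" ip.2.2 then
    (st.1 ++ [(st.2, ip.1 + 1)], ip.1 + 1)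
  else
    st

def separa_em_blocos_alt (pares_palavra_tag : List (String × String)) : List (List (String × String)) :=
  let cuts := ((PySem.List.enumerate pares_palavra_tag 0).foldl sepB_body ([], 0)).1
  cuts.map (fun c => PySem.List.slice pares_palavra_tag (some c.1) (some c.2))

-- ===== PRECONDITION & SPEC =====
def Spec_separa_em_blocos (pares_palavra_tag : List (String × String)) (out : List (List (String × String))) : Prop := out = separa_em_blocos_alt pares_palavra_tag
instance (pares_palavra_tag : List (String × String)) (out : List (List (String × String))) : Decidable (Spec_separa_em_blocos pares_palavra_tag out) := by unfold Spec_separa_em_blocos; infer_instance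

-- ===== CLAIM (what is proved, stated in full; the proofs are below) =====
def Claim_equal_separa_em_blocos : Prop := ∀ (pares_palavra_tag : List (String × String)), Dom_separa_em_blocos pares_palavra_tag → Spec_separa_em_blocos pares_palavra_tag (separa_em_blocos pares_palavra_tag)

-- ===== LEMMAS AND PROOFS =====

-- slice pares cur (k+1) = slice pares cur k ++ [pares[k]]  (for 0 ≤ cur ≤ k < length)
theorem slice_succ_right (pares : List (String × String)) (c k : Nat) (hck : c ≤ k)
    (hk : k < pares.length) :
    PySem.List.slice pares (some (c : Int)) (some ((k : Int) + 1))
      = PySem.List.slice pares (some (c : Int)) (some (k : Int)) ++ [pares[k]] := by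
  have h1 : ((k : Int) + 1) = ((k + 1 : Nat) : Int) := by push_cast; ring
  rw [h1, PySem.List.slice_natCast, PySem.List.slice_natCast]
  have h2 : k + 1 - c = (k - c) + 1 := by omega
  rw [h2, List.take_add_one]
  congr 1
  have h3 : (pares.drop c)[k - c]? = some pares[k] := by
    rw [List.getElem?_drop]
    have : c + (k - c) = k := by omega
    rw [this, List.getElem?_eq_getElem hk]
  simp [h3]

theorem slice_len (pares : List (String × String)) (c k : Nat)
    (hk : k ≤ pares.length) :
    (PySem.List.slice pares (some (c : Int)) (some (k : Int))).length = k - c := by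
  rw [PySem.List.slice_natCast]
  simp [List.length_take, List.length_drop]
  omega

theorem slice_single (pares : List (String × String)) (k : Nat) (hk : k < pares.length) :
    PySem.List.slice pares (some (k : Int)) (some ((k : Int) + 1)) = [pares[k]] := by
  rw [slice_succ_right pares k k (le_refl k) hk]
  rw [PySem.List.slice_natCast]
  simp

-- the main invariant: A's fold over the suffix equals (map slice of) B's fold,
-- provided documento is exactly the slice pares[cur:k]
theorem main_inv (pares : List (String × String)) :
    ∀ (ys : List (String × String)) (k : Nat) (cuts : List (Int × Int)) (cur : Nat),
      ys = pares.drop k → cur ≤ k →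
      (ys.foldl sepA_body
          ((cuts.map (fun c => PySem.List.slice pares (some c.1) (some c.2))),
            PySem.List.slice pares (some (cur : Int)) (some (k : Int)))).1
        = (((PySem.List.enumerate ys (k : Int)).foldl sepB_body (cuts, (cur : Int))).1).map
            (fun c => PySem.List.slice pares (some c.1) (some c.2)) := by
  intro ys
  induction ys with
  | nil => intro k cuts cur _ _; simp [PySem.List.enumerate]
  | cons p ys ih =>
    intro k cuts cur hys hck
    have hk : k < pares.length := by
      by_contra h
      rw [List.drop_eq_nil_of_le (by omega)] at hys
      simp at hys
    have hp? : pares[k]? = some p := by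
      have h0 : (pares.drop k)[0]? = some p := by rw [← hys]; simp
      simpa [List.getElem?_drop] using h0
    have hp : pares[k] = p := by
      rw [List.getElem?_eq_getElem hk] at hp?
      exact Option.some.inj hp?
    have hys' : ys = pares.drop (k + 1) := by
      have := congrArg List.tail hys
      simpa [List.tail_drop] using this
    rw [PySem.List.enumerate_cons, List.foldl_cons, List.foldl_cons]
    show (List.foldl sepA_body
        (sepA_body (_, PySem.List.slice pares (some (cur : Int)) (some (k : Int))) p) ys).1 = _
    rw [sepA_body, sepB_body]
    have hdoc := slice_succ_right pares cur k hck hk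
    rw [hp] at hdoc
    have hlen : (PySem.List.slice pares (some (cur : Int)) (some (k : Int)) ++ [p]).length
        = k - cur + 1 := by
      rw [List.length_append, slice_len pares cur k (le_of_lt hk)]; simp
    by_cases hB : (PySem.Str.isIn "B-" p.2 && decide (1 < (PySem.List.slice pares (some (cur : Int)) (some (k : Int)) ++ [p]).length)) = true
    · -- B- branch
      have hB' : (PySem.Str.isIn "B-" p.2 && decide ((cur : Int) < (k : Int))) = true := by
        rw [hlen] at hB
        simp only [Bool.and_eq_true, decide_eq_true_eq] at hB ⊢
        exact ⟨hB.1, by exact_mod_cast (by omega : cur < k)⟩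
      simp only [hB, hB', if_true]
      have hdl : (PySem.List.slice pares (some (cur : Int)) (some (k : Int)) ++ [p]).dropLast
          = PySem.List.slice pares (some (cur : Int)) (some (k : Int)) := by simp
      have hgl : (PySem.List.slice pares (some (cur : Int)) (some (k : Int)) ++ [p]).getLastD ("", "")
          = p := by simp
      rw [hdl, hgl]
      have := ih (k + 1) (cuts ++ [((cur : Int), (k : Int))]) k hys' (by omega)
      rw [List.map_append] at this
      have hsingle : [p] = PySem.List.slice pares (some (k : Int)) (some ((k + 1 : Nat) : Int)) := by
        rw [show ((k + 1 : Nat) : Int) = (k : Int) + 1 by push_cast; ring,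
          slice_single pares k hk, hp]
      rw [hsingle]
      simpa using this
    · have hB' : (PySem.Str.isIn "B-" p.2 && decide ((cur : Int) < (k : Int))) = false := by
        rw [hlen] at hB
        simp only [Bool.and_eq_true, decide_eq_true_eq, not_and] at hB
        simp only [Bool.and_eq_false_iff, decide_eq_false_iff_not]
        by_cases h1 : PySem.Str.isIn "B-" p.2 = true
        · right; intro hlt; exact absurd (by omega : 1 < k - cur + 1) (hB h1)
        · left; simpa using h1
      rw [Bool.not_eq_true] at hB
      simp only [hB, hB', Bool.false_eq_true, if_false]
      by_cases hE : PySem.Str.isIn "E-" p.2 = true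
      · -- E- branch
        simp only [hE, if_true]
        have := ih (k + 1) (cuts ++ [((cur : Int), (k : Int) + 1)]) (k + 1) hys' (le_refl _)
        rw [List.map_append] at this
        have hempty : PySem.List.slice pares (some ((k + 1 : Nat) : Int)) (some ((k + 1 : Nat) : Int))
            = ([] : List (String × String)) := by
          rw [PySem.List.slice_natCast]; simp
        have hc1 : ((k + 1 : Nat) : Int) = (k : Int) + 1 := by push_cast; ring
        rw [hempty, hc1] at this
        rw [← hdoc]
        exact this
      · -- else branch
        rw [Bool.not_eq_true] at hE
        simp only [hE, Bool.false_eq_true, if_false]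
        have := ih (k + 1) cuts cur hys' (by omega)
        rw [show ((k + 1 : Nat) : Int) = (k : Int) + 1 by push_cast; ring] at this
        rw [← hdoc]
        exact this

-- ===== VERDICT (by name: the statement is the Claim_ definition above) =====
theorem separa_em_blocos_spec : Claim_equal_separa_em_blocos := by
  intro pares _
  unfold Spec_separa_em_blocos separa_em_blocos separa_em_blocos_alt
  rw [PySem.List.foldl_pyRange_pyGetD' (f := sepA_body) (d := ("", "")) (init := (([] : List (List (String × String))), ([] : List (String × String))))]
  have h0 : ([] : List (String × String))
      = PySem.List.slice pares (some ((0 : Nat) : Int)) (some ((0 : Nat) : Int)) := by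
    rw [PySem.List.slice_natCast]; simp
  have := main_inv pares pares 0 [] 0 (by simp) (le_refl 0)
  simp only [Nat.cast_zero] at this h0
  rw [← h0] at this
  simpa using this
  norm_num
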